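-- pv_equiv track=rewrite | github.com/Mjlozano/DiscretasBot | combi1.py | firstP
-- ===== SOURCE A (Python) =====
-- from itertools import combinations
--
-- def firstP(str, p, k):
--     perm = list(sorted(''.join(chars) for chars in combinations(str, k)))
--     if len(perm)>=p:
--         fResult = f'Primeras {p} palabras\n'
--         for x in perm[:p]:
--             fResult = fResult+"\n"+x
--     else:
--         fResult=f'La cantidad de palabras que se pueden generar es menor a las requeridas con el parámetro p'
--     return fResult
-- ===== SOURCE B (Python) =====
-- def _comb(n, k):
--     # closed-form binomial coefficient C(n, k) via the multiplicative formula
--     if k < 0 or k > n: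
--         return 0
--     c = 1
--     for i in range(k):
--         c = c * (n - i) // (i + 1)
--     return c
--
-- def _genwords(s, k):
--     # all length-k subsequences of s as strings, by include/exclude of the LAST character
--     if k == 0:
--         return ['']
--     if len(s) < k:
--         return []
--     return _genwords(s[:-1], k) + [t + s[-1] for t in _genwords(s[:-1], k - 1)]
--
-- def firstP(str, p, k):
--     n = len(str)
--     if _comb(n, k) >= p:
--         words = sorted(_genwords(str, k))
--         header = f'Primeras {p} palabras\n'
--         return header + ''.join('\n' + w for w in words[:p])
--     return 'La cantidad de palabras que se pueden generar es menor a las requeridas con el parámetro p'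
-- ===== Notes on version B (the rewrite author's own statement) =====
-- stated objective: alternative
-- what changed: B replaces itertools.combinations + sort-everything with a closed-form multiplicative binomial count C(n,k) to decide the branch (so nothing is generated when the count is short), a hand-rolled include/exclude-last recursive generator that builds the strings directly, and a join instead of A's string-concatenation loop.
import Mathlib
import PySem

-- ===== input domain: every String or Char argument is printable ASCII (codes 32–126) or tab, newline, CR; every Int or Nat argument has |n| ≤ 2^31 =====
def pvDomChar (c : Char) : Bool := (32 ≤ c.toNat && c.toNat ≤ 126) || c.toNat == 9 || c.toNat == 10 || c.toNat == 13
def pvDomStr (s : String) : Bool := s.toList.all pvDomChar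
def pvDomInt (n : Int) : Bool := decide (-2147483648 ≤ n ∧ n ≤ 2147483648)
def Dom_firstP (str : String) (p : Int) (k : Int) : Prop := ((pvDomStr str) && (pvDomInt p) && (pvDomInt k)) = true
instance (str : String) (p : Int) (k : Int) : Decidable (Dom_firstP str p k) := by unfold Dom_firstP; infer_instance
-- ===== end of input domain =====

-- B replaces itertools.combinations + sort with a closed-form binomial count for the branch test,
-- an include/exclude-last recursive generator, and a join instead of A's concatenation loop
-- (alternative decomposition; equivalence of the return value is proved for k ≥ 0, where A does not raise).

-- ===== PORT A =====
-- itertools.combinations(str, k) ported by hand (index order: take head then combinations of the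
-- tail, or skip head); exact for k ≥ 0.
def pvCombA : List Char → Nat → List (List Char)
  | _, 0 => [[]]
  | [], _ + 1 => []
  | c :: cs, kk + 1 => ((pvCombA cs kk).map (fun t => c :: t)) ++ pvCombA cs (kk + 1)

def firstP (str : String) (p : Int) (k : Int) : String :=
  let perm : List String :=
    PySem.List.sorted ((pvCombA str.toList k.toNat).map String.ofList) (fun x => x) false
  if ((perm.length : Int) ≥ p) then
    (PySem.List.slice perm none (some p)).foldl (fun acc x => acc ++ "\n" ++ x)
      ("Primeras " ++ PySem.Int.toStr p ++ " palabras\n")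
  else
    "La cantidad de palabras que se pueden generar es menor a las requeridas con el parámetro p"

-- ===== PORT B =====
-- _comb of Source B: multiplicative formula, c = c*(n-i)//(i+1) over range(k)
def pvComb (n : Int) (kk : Int) : Int :=
  if kk < 0 ∨ n < kk then 0
  else (PySem.List.pyRange 0 kk).foldl (fun c i => PySem.Int.floordiv (c * (n - i)) (i + 1)) 1

-- _genwords of Source B: include/exclude the LAST character (strings kept as List Char; exact for k ≥ 0)
def pvGenWords (s : List Char) (kk : Nat) : List (List Char) :=
  match kk with
  | 0 => [[]]
  | kk' + 1 =>
    if _h : s.length < kk' + 1 then []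
    else pvGenWords s.dropLast (kk' + 1) ++ (pvGenWords s.dropLast kk').map (fun t => t ++ [s.getLastD ' '])
termination_by s.length
decreasing_by
  · simp [List.length_dropLast]; omega
  · simp [List.length_dropLast]; omega

def firstP_alt (str : String) (p : Int) (k : Int) : String :=
  if pvComb (PySem.Str.len str) k ≥ p then
    let words : List String :=
      PySem.List.sorted ((pvGenWords str.toList k.toNat).map String.ofList) (fun x => x) false
    ("Primeras " ++ PySem.Int.toStr p ++ " palabras\n") ++
      PySem.Str.join "" ((PySem.List.slice words none (some p)).map (fun w => "\n" ++ w))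
  else
    "La cantidad de palabras que se pueden generar es menor a las requeridas con el parámetro p"

-- ===== PRECONDITION & SPEC =====
-- Pre_ excludes k < 0, where A's combinations(str, k) raises ValueError.
def Pre_firstP (_str : String) (_p : Int) (k : Int) : Prop := 0 ≤ k
instance (str : String) (p : Int) (k : Int) : Decidable (Pre_firstP str p k) := by
  unfold Pre_firstP; infer_instance

def pvWitness_firstP : String × Int × Int := ("bca", 2, 2)

def Spec_firstP (str : String) (p : Int) (k : Int) (out : String) : Prop := out = firstP_alt str p k
instance (str : String) (p : Int) (k : Int) (out : String) : Decidable (Spec_firstP str p k out) := by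
  unfold Spec_firstP; infer_instance

-- ===== CLAIM (what is proved, stated in full; the proofs are below) =====
def Claim_equal_firstP : Prop :=
  ∀ (str : String) (p : Int) (k : Int), Dom_firstP str p k → Pre_firstP str p k →
    Spec_firstP str p k (firstP str p k)

-- ===== LEMMAS AND PROOFS =====

-- A's combination list has C(n, k) elements.
theorem pvCombA_length (l : List Char) : ∀ kk : Nat, (pvCombA l kk).length = l.length.choose kk := by
  induction l with
  | nil => intro kk; cases kk <;> simp [pvCombA]
  | cons c cs ih =>
    intro kk
    cases kk with
    | zero => simp [pvCombA]
    | succ m => simp [pvCombA, ih, Nat.choose_succ_succ]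

-- The multiplicative loop computes the binomial coefficient.
theorem pvComb_loop (n : Nat) : ∀ j : Nat, j ≤ n →
    (PySem.List.pyRange 0 (j : Int)).foldl
      (fun c i => PySem.Int.floordiv (c * ((n : Int) - i)) (i + 1)) 1 = (n.choose j : Int) := by
  intro j
  induction j with
  | zero => intro _; simp [PySem.List.pyRange_one_eq_nil (by omega : (0:Int) ≤ 0)]
  | succ m ih =>
    intro hj
    have h1 : ((m + 1 : Nat) : Int) = (m : Int) + 1 := by push_cast; ring
    rw [h1, PySem.List.pyRange_one_succ_right (by positivity), List.foldl_append,
      ih (by omega)]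
    simp only [List.foldl]
    have hmn : ((n : Int) - (m : Int)) = ((n - m : Nat) : Int) := by
      have : m ≤ n := by omega
      push_cast [this]; ring
    have hm1 : ((m : Int) + 1) = ((m + 1 : Nat) : Int) := by push_cast; ring
    rw [hmn, hm1, ← Nat.cast_mul, PySem.Int.floordiv_natCast]
    have : n.choose m * (n - m) = n.choose (m + 1) * (m + 1) := (Nat.choose_succ_right_eq n m).symm
    rw [this, Nat.mul_div_cancel _ (by omega)]

theorem pvComb_eq (l : List Char) (k : Int) (hk : 0 ≤ k) :
    pvComb (l.length : Int) k = ((pvCombA l k.toNat).length : Int) := by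
  rw [pvCombA_length]
  unfold pvComb
  by_cases h : (l.length : Int) < k
  · rw [if_pos (Or.inr h), Nat.choose_eq_zero_of_lt (by omega)]
    simp
  · rw [if_neg (by omega)]
    have hk2 : (k.toNat : Int) = k := Int.toNat_of_nonneg hk
    rw [← hk2]
    exact pvComb_loop l.length k.toNat (by omega)

-- combinations of l ++ [c]: those of l, plus those of l of one fewer element extended by c.
theorem pvCombA_concat_perm (c : Char) :
    ∀ (l : List Char) (kk : Nat),
      (pvCombA (l ++ [c]) (kk + 1)).Perm
        (pvCombA l (kk + 1) ++ (pvCombA l kk).map (fun t => t ++ [c])) := by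
  intro l
  induction l with
  | nil =>
    intro kk
    cases kk <;> simp [pvCombA]
  | cons a l ih =>
    intro kk
    cases kk with
    | zero =>
      have h0 := ih 0
      simp only [List.cons_append, pvCombA, List.map, List.nil_append] at h0 ⊢
      exact List.Perm.cons _ h0
    | succ m =>
      simp only [List.cons_append, pvCombA]
      refine List.Perm.trans
        (List.Perm.append (List.Perm.map _ (ih m)) (ih (m + 1))) ?_
      simp only [List.map_append, List.map_map, List.append_assoc, Function.comp_def,
        List.cons_append]
      exact List.Perm.append_left _ (List.perm_append_comm_assoc _ _ _)

-- B's generator is a permutation of A's.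
theorem pvGenWords_perm (l : List Char) : ∀ kk : Nat, (pvGenWords l kk).Perm (pvCombA l kk) := by
  induction l using List.reverseRecOn with
  | nil =>
    intro kk
    cases kk <;> simp [pvGenWords, pvCombA]
  | append_singleton xs c ih =>
    intro kk
    cases kk with
    | zero => simp [pvGenWords, pvCombA]
    | succ m =>
      rw [pvGenWords]
      by_cases h : (xs ++ [c]).length < m + 1
      · rw [dif_pos h]
        have hlen : (pvCombA (xs ++ [c]) (m + 1)).length = 0 := by
          rw [pvCombA_length, Nat.choose_eq_zero_of_lt h]
        rw [List.length_eq_zero_iff.mp hlen]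
      · rw [dif_neg h]
        simp only [List.dropLast_concat, List.getLastD_concat]
        refine List.Perm.trans
          (List.Perm.append (ih (m + 1)) (List.Perm.map _ (ih m))) ?_
        exact (pvCombA_concat_perm c xs m).symm

-- ''.join with empty separator, over [] and over a cons, at the toList level.
theorem pvJoinNil_cons (y : List Char) (ys : List (List Char)) :
    PySem.Chars.join [] (y :: ys) = y ++ PySem.Chars.join [] ys := by
  unfold PySem.Chars.join
  cases ys <;> simp [List.intercalate, List.intersperse]

-- A's accumulation loop is the header followed by ''.join('\n' + w …).
theorem pvFold_join (xs : List String) : ∀ init : String,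
    xs.foldl (fun acc x => acc ++ "\n" ++ x) init
      = init ++ PySem.Str.join "" (xs.map (fun w => "\n" ++ w)) := by
  induction xs with
  | nil =>
    intro init
    apply String.toList_inj.mp
    simp [PySem.Str.toList_join, PySem.Chars.join, List.intercalate]
  | cons x xs ih =>
    intro init
    simp only [List.foldl, List.map, ih]
    apply String.toList_inj.mp
    simp [PySem.Str.toList_join, pvJoinNil_cons, String.toList_append]

theorem pvWords_eq (l : List Char) (kk : Nat) :
    PySem.List.sorted ((pvGenWords l kk).map String.ofList) (fun x => x) false
      = PySem.List.sorted ((pvCombA l kk).map String.ofList) (fun x => x) false := by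
  exact PySem.List.sorted_eq_sorted_of_perm _ _ _ (fun a b h => h)
    (List.Perm.map _ (pvGenWords_perm l kk))

-- ===== VERDICT (by name: the statement is the Claim_ definition above) =====
theorem firstP_spec : Claim_equal_firstP := by
  intro str p k _ hpre
  unfold Spec_firstP firstP firstP_alt
  have hlen : PySem.Str.len str = (str.toList.length : Int) := by
    simp [PySem.Str.len_eq]
  have hcond : pvComb (PySem.Str.len str) k
      = (((PySem.List.sorted ((pvCombA str.toList k.toNat).map String.ofList)
            (fun x => x) false).length : Nat) : Int) := by
    rw [hlen, pvComb_eq str.toList k hpre, PySem.List.length_sorted, List.length_map]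
  rw [hcond, pvWords_eq]
  by_cases h : (((PySem.List.sorted ((pvCombA str.toList k.toNat).map String.ofList)
      (fun x => x) false).length : Nat) : Int) ≥ p
  · rw [if_pos h, if_pos h, pvFold_join]
  · rw [if_neg h, if_neg h]
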